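-- pv_equiv track=rewrite | github.com/PlanXLab/upyboard | device/ticle/src/ext/bme680.py | __encode_gas_wait
-- ===== SOURCE A (Python) =====
-- def __encode_gas_wait(ms: int) -> int:
--     """gas_wait_x(self.__REG_GAS_WAIT_0..) encoding (1..4032ms, 0xFF=max)"""
--     dur = int(ms)
--     if dur >= 0xFC0:  # >= 4032 ms
--         return 0xFF
--     factor = 0
--     while dur > 0x3F and factor < 3:
--         dur //= 4
--         factor += 1
--     return int(dur + (factor << 6))
-- ===== SOURCE B (Python) =====
-- def __encode_gas_wait(ms: int) -> int:
--     """gas_wait_x encoding: closed-form threshold selection instead of the division loop."""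
--     dur = int(ms)
--     if dur >= 0xFC0:
--         return 0xFF
--     if dur <= 0x3F:
--         factor = 0
--     elif dur <= 0xFF:
--         factor = 1
--     elif dur <= 0x3FF:
--         factor = 2
--     else:
--         factor = 3
--     return (dur >> (2 * factor)) + (factor << 6)
-- ===== Notes on version B (the rewrite author's own statement) =====
-- stated objective: simpler
-- what changed: Replaces the iterative divide-by-4 search for the shift factor with a closed-form threshold comparison (factor = 0/1/2/3 by range) and a single shift.
import Mathlib
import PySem

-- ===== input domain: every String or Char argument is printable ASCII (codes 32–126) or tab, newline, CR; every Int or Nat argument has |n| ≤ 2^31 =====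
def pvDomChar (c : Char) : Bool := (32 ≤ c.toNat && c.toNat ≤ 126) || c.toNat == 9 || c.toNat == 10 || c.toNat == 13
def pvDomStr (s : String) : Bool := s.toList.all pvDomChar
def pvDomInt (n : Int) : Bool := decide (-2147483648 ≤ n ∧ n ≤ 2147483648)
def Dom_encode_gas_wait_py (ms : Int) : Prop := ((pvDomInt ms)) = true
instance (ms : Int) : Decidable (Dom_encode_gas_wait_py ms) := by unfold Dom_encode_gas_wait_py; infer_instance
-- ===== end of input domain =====

-- B replaces A's iterative divide-by-4 loop with a closed-form threshold selection of the shift factor (objective: simpler).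
-- ===== PORT A =====
-- loop state: (dur, factor); at most 3 iterations since factor < 3; fuel 3 suffices
def pvAWaitLoop : Nat → Int → Int → Int × Int
  | 0, dur, factor => (dur, factor)
  | n+1, dur, factor =>
    if dur > 0x3F ∧ factor < 3 then
      pvAWaitLoop n (PySem.Int.floordiv dur 4) (factor + 1)
    else (dur, factor)

def encode_gas_wait_py (ms : Int) : Int :=
  let dur := ms
  if dur ≥ 0xFC0 then 0xFF
  else
    let p := pvAWaitLoop 3 dur 0
    p.1 + p.2 * 64

-- ===== PORT B =====
def encode_gas_wait_py_alt (ms : Int) : Int :=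
  let dur := ms
  if dur ≥ 0xFC0 then 0xFF
  else
    let factor : Int := if dur ≤ 0x3F then 0 else if dur ≤ 0xFF then 1 else if dur ≤ 0x3FF then 2 else 3
    PySem.Int.floordiv dur (2 ^ (2 * factor).toNat) + factor * 64

-- ===== PRECONDITION & SPEC =====
def Spec_encode_gas_wait_py (ms : Int) (out : Int) : Prop := out = encode_gas_wait_py_alt ms
instance (ms : Int) (out : Int) : Decidable (Spec_encode_gas_wait_py ms out) := by unfold Spec_encode_gas_wait_py; infer_instance

-- ===== CLAIM (what is proved, stated in full; the proofs are below) =====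
def Claim_equal_encode_gas_wait_py : Prop := ∀ (ms : Int), Dom_encode_gas_wait_py ms → Spec_encode_gas_wait_py ms (encode_gas_wait_py ms)

-- ===== LEMMAS AND PROOFS =====

-- ===== VERDICT (by name: the statement is the Claim_ definition above) =====
theorem encode_gas_wait_py_spec : Claim_equal_encode_gas_wait_py := by
  intro ms _
  simp only [Spec_encode_gas_wait_py, encode_gas_wait_py, encode_gas_wait_py_alt, pvAWaitLoop]
  split_ifs <;>
    simp only [PySem.Int.floordiv_eq_ediv_of_pos (show (0:Int) < 4 by norm_num),
      show ((2:Int) * 0).toNat = 0 from rfl, show ((2:Int) * 1).toNat = 2 from rfl,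
      show ((2:Int) * 2).toNat = 4 from rfl, show ((2:Int) * 3).toNat = 6 from rfl,
      show ((2:Int) ^ (0:Nat)) = 1 from rfl, show ((2:Int) ^ (2:Nat)) = 4 from rfl,
      show ((2:Int) ^ (4:Nat)) = 16 from rfl, show ((2:Int) ^ (6:Nat)) = 64 from rfl,
      PySem.Int.floordiv_eq_ediv_of_pos (show (0:Int) < 1 by norm_num),
      PySem.Int.floordiv_eq_ediv_of_pos (show (0:Int) < 16 by norm_num),
      PySem.Int.floordiv_eq_ediv_of_pos (show (0:Int) < 64 by norm_num)] at * <;>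
    omega
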